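-- pv_equiv track=rewrite | github.com/130e/emulator-test | scripts/processing/metrics.py | filter_link_duration
-- ===== SOURCE A (Python) =====
-- from collections import defaultdict
--
-- def filter_link_duration(ho_times, target_links, time_end, initial_link=1):
--     prev_link = initial_link
--     duration = defaultdict(list)
--     duration[prev_link].append([0, -1])
--     for i in range(len(ho_times)):
--         if target_links[i] != prev_link:
--             duration[prev_link][-1][1] = ho_times[i]
--             prev_link = target_links[i]
--             duration[prev_link].append([ho_times[i], -1])
--     duration[prev_link][-1][1] = time_end
--     return duration
-- ===== SOURCE B (Python) =====
-- from collections import defaultdict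
--
-- def filter_link_duration(ho_times, target_links, time_end, initial_link=1):
--     # pass 1: segment boundaries (link, start_time), one per link change
--     boundaries = [(initial_link, 0)]
--     for t, link in zip(ho_times, target_links):
--         if link != boundaries[-1][0]:
--             boundaries.append((link, t))
--     # pass 2: pair consecutive boundaries into closed intervals per link
--     duration = defaultdict(list)
--     for (link, start), (_, nxt) in zip(boundaries, boundaries[1:]):
--         duration[link].append([start, nxt])
--     last_link, last_start = boundaries[-1]
--     duration[last_link].append([last_start, time_end])
--     return duration
-- ===== Notes on version B (the rewrite author's own statement) =====
-- stated objective: simpler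
-- what changed: Replaced the single pass that mutates a -1 end-sentinel inside the dict with a two-pass decomposition: first collect segment boundaries (link, start) on link changes, then pair consecutive boundaries into closed [start, end] intervals (last one closed with time_end).
import Mathlib
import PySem

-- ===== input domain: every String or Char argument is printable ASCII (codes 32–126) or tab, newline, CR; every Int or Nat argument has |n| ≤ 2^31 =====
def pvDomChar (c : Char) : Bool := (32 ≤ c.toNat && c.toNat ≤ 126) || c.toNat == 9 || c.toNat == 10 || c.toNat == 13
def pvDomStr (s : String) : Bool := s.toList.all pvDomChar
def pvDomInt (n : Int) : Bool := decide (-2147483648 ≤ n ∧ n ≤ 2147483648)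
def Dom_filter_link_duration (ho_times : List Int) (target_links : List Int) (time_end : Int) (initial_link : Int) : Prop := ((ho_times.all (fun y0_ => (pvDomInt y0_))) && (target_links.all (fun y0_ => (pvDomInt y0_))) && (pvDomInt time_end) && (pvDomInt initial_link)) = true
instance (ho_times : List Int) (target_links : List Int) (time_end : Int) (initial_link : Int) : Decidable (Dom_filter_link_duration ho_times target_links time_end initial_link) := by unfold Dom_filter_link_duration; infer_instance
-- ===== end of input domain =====

-- B replaces A's single pass mutating a -1 end-sentinel inside the dict by a two-pass
-- decomposition (collect segment boundaries, then pair consecutive boundaries); objective: simpler.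

-- ===== PORT A =====
-- duration[prev][-1][1] = x  (the list at the key is nonempty whenever A performs this)
def pvSetLast1 (l : List (List Int)) (x : Int) : List (List Int) :=
  l.dropLast ++ [(l.getLast?.getD []).set 1 x]

-- A's loop body for one i, given p = (ho_times[i], target_links[i]); st = (prev_link, duration)
def pvStepA (st : Int × PySem.Dict Int (List (List Int))) (p : Int × Int) : Int × PySem.Dict Int (List (List Int)) :=
  if p.2 ≠ st.1 then
    let d1 := st.2.modify st.1 [] (fun l => pvSetLast1 l p.1)
    (p.2, d1.insert p.2 ((d1.getD p.2 []) ++ [[p.1, -1]]))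
  else st

def filter_link_duration (ho_times : List Int) (target_links : List Int) (time_end : Int) (initial_link : Int) : List (Int × List (List Int)) :=
  let d0 : PySem.Dict Int (List (List Int)) :=
    PySem.Dict.empty.insert initial_link ((PySem.Dict.empty.getD initial_link []) ++ [[0, -1]])
  let st := (PySem.List.pyRange 0 (ho_times.length : Int) 1).foldl
    (fun st i => pvStepA st (PySem.List.pyGetD ho_times i 0, PySem.List.pyGetD target_links i 0))
    (initial_link, d0)
  (st.2.modify st.1 [] (fun l => pvSetLast1 l time_end)).items

-- ===== PORT B =====
-- B's first-pass body: append a boundary when the link changes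
def pvStepB (bs : List (Int × Int)) (p : Int × Int) : List (Int × Int) :=
  if p.2 ≠ (bs.getLast?.getD (0, 0)).1 then bs ++ [(p.2, p.1)] else bs

-- B's second pass: pair consecutive boundaries into closed intervals, grouped by link
def pvPairDict (bs : List (Int × Int)) : PySem.Dict Int (List (List Int)) :=
  (bs.zip bs.tail).foldl
    (fun (d : PySem.Dict Int (List (List Int))) pr =>
      d.insert pr.1.1 ((d.getD pr.1.1 []) ++ [[pr.1.2, pr.2.2]]))
    PySem.Dict.empty

def filter_link_duration_alt (ho_times : List Int) (target_links : List Int) (time_end : Int) (initial_link : Int) : List (Int × List (List Int)) :=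
  let boundaries := (ho_times.zip target_links).foldl pvStepB [(initial_link, 0)]
  let d := pvPairDict boundaries
  let last := boundaries.getLast?.getD (0, 0)
  (d.insert last.1 ((d.getD last.1 []) ++ [[last.2, time_end]])).items

-- ===== PRECONDITION & SPEC =====
-- Pre_ excludes exactly the inputs where A raises IndexError: target_links shorter than ho_times.
def Pre_filter_link_duration (ho_times : List Int) (target_links : List Int) (time_end : Int) (initial_link : Int) : Prop :=
  ho_times.length ≤ target_links.length
instance (ho_times : List Int) (target_links : List Int) (time_end : Int) (initial_link : Int) : Decidable (Pre_filter_link_duration ho_times target_links time_end initial_link) := by unfold Pre_filter_link_duration; infer_instance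

def pvWitness_filter_link_duration : List Int × List Int × Int × Int := ([2, 5, 7], [2, 2, 1], 10, 1)

def Spec_filter_link_duration (ho_times : List Int) (target_links : List Int) (time_end : Int) (initial_link : Int) (out : List (Int × List (List Int))) : Prop := out = filter_link_duration_alt ho_times target_links time_end initial_link
instance (ho_times : List Int) (target_links : List Int) (time_end : Int) (initial_link : Int) (out : List (Int × List (List Int))) : Decidable (Spec_filter_link_duration ho_times target_links time_end initial_link out) := by unfold Spec_filter_link_duration; infer_instance

-- ===== CLAIM (what is proved, stated in full; the proofs are below) =====
def Claim_equal_filter_link_duration : Prop := ∀ (ho_times : List Int) (target_links : List Int) (time_end : Int) (initial_link : Int), Dom_filter_link_duration ho_times target_links time_end initial_link → Pre_filter_link_duration ho_times target_links time_end initial_link → Spec_filter_link_duration ho_times target_links time_end initial_link (filter_link_duration ho_times target_links time_end initial_link)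

-- ===== LEMMAS AND PROOFS =====

-- A's dict state over boundaries bs: pvPairDict bs plus an open [-1] interval for the last boundary
def pvOpenDict (bs : List (Int × Int)) : PySem.Dict Int (List (List Int)) :=
  let l := bs.getLast?.getD (0, 0)
  (pvPairDict bs).insert l.1 (((pvPairDict bs).getD l.1 []) ++ [[l.2, -1]])

theorem pv_stepB_ne_nil (zs : List (Int × Int)) : ∀ (bs : List (Int × Int)), bs ≠ [] →
    zs.foldl pvStepB bs ≠ [] := by
  induction zs with
  | nil => intro bs h; simpa
  | cons p zs ih => intro bs h; exact ih _ (by unfold pvStepB; split <;> simp_all)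

theorem pv_insert_insert_self {κ ν : Type} [BEq κ] [LawfulBEq κ] (d : PySem.Dict κ ν) (k : κ) (v w : ν) :
    (d.insert k v).insert k w = d.insert k w := by
  apply PySem.Dict.ext
  by_cases hc : d.contains k
  · rw [PySem.Dict.items_insert_of_contains _ _ (by simp),
        PySem.Dict.items_insert_of_contains _ _ hc,
        PySem.Dict.items_insert_of_contains _ _ hc, List.map_map]
    apply List.map_congr_left
    intro p _; by_cases h : p.1 == k <;> simp [h, Function.comp]
  · have hc' : d.contains k = false := by simpa using hc
    rw [PySem.Dict.items_insert_of_contains _ _ (by simp),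
        PySem.Dict.items_insert_of_not_contains _ _ hc',
        PySem.Dict.items_insert_of_not_contains _ _ hc',
        List.map_append]
    have hne : ∀ p ∈ d.items, p.1 ≠ k := by
      intro p hp hk
      exact absurd ((PySem.Dict.contains_iff_mem_keys d k).mpr (hk ▸ PySem.Dict.mem_keys_of_mem_items d hp)) (by simp [hc'])
    congr 1
    · conv_rhs => rw [← List.map_id d.items]
      apply List.map_congr_left
      intro p hp; simp [hne p hp]
    · simp

theorem pv_modify_eq_insert {κ ν : Type} [BEq κ] [LawfulBEq κ] (d : PySem.Dict κ ν) (k : κ) (d0 : ν) (f : ν → ν) :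
    d.modify k d0 f = d.insert k (f (d.getD k d0)) := rfl

theorem pv_zip_tail_append : ∀ (bs : List (Int × Int)) (x : Int × Int) (h : bs ≠ []),
    (bs ++ [x]).zip (bs ++ [x]).tail = bs.zip bs.tail ++ [(bs.getLast h, x)] := by
  intro bs
  induction bs with
  | nil => intro x h; simp at h
  | cons a t ih =>
    intro x h
    cases t with
    | nil => simp
    | cons b t' =>
      rw [show ((a :: b :: t') ++ [x]).zip ((a :: b :: t') ++ [x]).tail
            = (a, b) :: (((b :: t') ++ [x]).zip (((b :: t') ++ [x]).tail)) from rfl,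
          ih x (List.cons_ne_nil b t')]
      simp [List.getLast_cons]

theorem pv_closed_append (bs : List (Int × Int)) (x : Int × Int) (h : bs ≠ []) :
    pvPairDict (bs ++ [x]) =
      (pvPairDict bs).insert (bs.getLast h).1
        (((pvPairDict bs).getD (bs.getLast h).1 []) ++ [[(bs.getLast h).2, x.2]]) := by
  unfold pvPairDict
  rw [pv_zip_tail_append bs x h, List.foldl_append]
  rfl

theorem pv_getLast?_getD (bs : List (Int × Int)) (h : bs ≠ []) :
    bs.getLast?.getD (0, 0) = bs.getLast h := by
  rw [List.getLast?_eq_getLast_of_ne_nil h]; rfl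

theorem pv_setLast1_append (pre : List (List Int)) (s t x : Int) :
    pvSetLast1 (pre ++ [[s, t]]) x = pre ++ [[s, x]] := by
  unfold pvSetLast1
  simp [List.set]

theorem pv_modify_open (bs : List (Int × Int)) (h : bs ≠ []) (t : Int) :
    (pvOpenDict bs).modify (bs.getLast h).1 [] (fun l => pvSetLast1 l t)
      = (pvPairDict bs).insert (bs.getLast h).1
          (((pvPairDict bs).getD (bs.getLast h).1 []) ++ [[(bs.getLast h).2, t]]) := by
  unfold pvOpenDict
  rw [pv_getLast?_getD bs h, pv_modify_eq_insert, PySem.Dict.getD_insert_self,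
      pv_setLast1_append, pv_insert_insert_self]

theorem pv_stepA_open (bs : List (Int × Int)) (h : bs ≠ []) (p : Int × Int) :
    pvStepA ((bs.getLast h).1, pvOpenDict bs) p =
      (((pvStepB bs p).getLast (by
          unfold pvStepB; split <;> simp_all)).1, pvOpenDict (pvStepB bs p)) := by
  by_cases hp : p.2 = (bs.getLast h).1
  · have hb : pvStepB bs p = bs := by unfold pvStepB; rw [pv_getLast?_getD bs h]; simp [hp]
    unfold pvStepA
    simp only [hb, hp]
    simp
  · have hb : pvStepB bs p = bs ++ [(p.2, p.1)] := by
      unfold pvStepB; rw [pv_getLast?_getD bs h]; simp [hp]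
    unfold pvStepA
    simp only [ne_eq, hp, not_false_iff, if_pos]
    rw [pv_modify_open bs h p.1, ← pv_closed_append bs (p.2, p.1) h]
    unfold pvOpenDict
    rw [pv_getLast?_getD (pvStepB bs p) (by unfold pvStepB; split <;> simp_all)]
    simp [hb, ]


theorem pv_main (zs : List (Int × Int)) : ∀ (bs : List (Int × Int)) (h : bs ≠ []),
    zs.foldl pvStepA ((bs.getLast h).1, pvOpenDict bs) =
      (((zs.foldl pvStepB bs).getLast (pv_stepB_ne_nil zs bs h)).1,
       pvOpenDict (zs.foldl pvStepB bs)) := by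
  induction zs with
  | nil => intro bs h; rfl
  | cons p zs ih =>
    intro bs h
    simp only [List.foldl_cons]
    rw [pv_stepA_open bs h p]
    exact ih _ _

theorem pv_key {σ : Type} : ∀ (ho tl : List Int), ho.length ≤ tl.length →
    ∀ (f : σ → Int → Int → σ) (init : σ),
    (List.range ho.length).foldl (fun s k => f s (ho.getD k 0) (tl.getD k 0)) init
      = (ho.zip tl).foldl (fun s p => f s p.1 p.2) init := by
  intro ho
  induction ho with
  | nil => intro tl h f init; simp
  | cons a ho' ih =>
    intro tl h f init
    cases tl with
    | nil => simp at h
    | cons b tl' =>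
      rw [show (a :: ho').length = ho'.length + 1 from rfl, List.range_succ_eq_map]
      simp only [List.foldl_cons, List.foldl_map, List.getD_cons_zero, List.getD_cons_succ,
        List.zip_cons_cons]
      exact ih tl' (by simpa using h) f (f init a b)

-- bridge: A's index loop over pyRange equals the fold over the zipped lists (needs Pre_)
theorem pv_bridge {σ : Type} (ho tl : List Int) (h : ho.length ≤ tl.length)
    (f : σ → Int → Int → σ) (init : σ) :
    (PySem.List.pyRange 0 (ho.length : Int) 1).foldl
      (fun s i => f s (PySem.List.pyGetD ho i 0) (PySem.List.pyGetD tl i 0)) init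
    = (ho.zip tl).foldl (fun s p => f s p.1 p.2) init := by
  rw [PySem.List.pyRange_one, List.foldl_map]
  simp only [Int.sub_zero, Int.toNat_natCast, zero_add, PySem.List.pyGetD_natCast]
  exact pv_key ho tl h f init

theorem pv_A_eq (ho tl : List Int) (te il : Int) (hpre : ho.length ≤ tl.length) :
    filter_link_duration ho tl te il = filter_link_duration_alt ho tl te il := by
  have hne : (ho.zip tl).foldl pvStepB [(il, 0)] ≠ [] :=
    pv_stepB_ne_nil (ho.zip tl) [(il, 0)] (by simp)
  have e0 : ((il : Int),
        PySem.Dict.empty.insert il ((PySem.Dict.empty.getD il []) ++ [[0, -1]]))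
      = ((([((il : Int), (0 : Int))]).getLast (by simp)).1, pvOpenDict [(il, 0)]) := rfl
  have e2 : (fun (s : Int × PySem.Dict Int (List (List Int))) (p : Int × Int) => pvStepA s (p.1, p.2)) = pvStepA := by
    funext s p; rfl
  simp only [filter_link_duration, filter_link_duration_alt]
  rw [pv_bridge ho tl hpre (fun s a b => pvStepA s (a, b))
        ((il : Int), PySem.Dict.empty.insert il ((PySem.Dict.empty.getD il []) ++ [[0, -1]])),
      e2, e0, pv_main (ho.zip tl) [(il, 0)] (by simp)]
  rw [pv_modify_open ((ho.zip tl).foldl pvStepB [(il, 0)]) hne te,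
      ← pv_getLast?_getD ((ho.zip tl).foldl pvStepB [(il, 0)]) hne]

-- ===== VERDICT (by name: the statement is the Claim_ definition above) =====
theorem filter_link_duration_spec : Claim_equal_filter_link_duration := by
  intro ho tl te il _ hpre
  exact pv_A_eq ho tl te il hpre
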